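-- pv_equiv track=rewrite | github.com/monikaheinzl/Hopfield-basecaller | analysis/error_summary.py | get_deletion_homopolymer_length
-- ===== SOURCE A (Python) =====
-- def get_deletion_homopolymer_length(seq):
--     seq_len = len(seq)
--     middle_i = seq_len // 2
--     base = seq[middle_i]
--     start = middle_i
--     while start > 0:
--         if seq[start-1] == base:
--             start -= 1
--         else:
--             break
--     end = middle_i+1
--     while end < seq_len:
--         if seq[end] == base:
--             end += 1
--         else:
--             break
--     homopolymer = seq[start:end].replace('.', '')
--     return len(homopolymer)
-- ===== SOURCE B (Python) =====
-- def get_deletion_homopolymer_length(seq):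
--     middle_i = len(seq) // 2
--     runs = []  # maximal (char, length) runs of seq, built in one forward pass
--     for ch in seq:
--         if runs and runs[-1][0] == ch:
--             runs[-1][1] += 1
--         else:
--             runs.append([ch, 1])
--     pos = 0
--     for ch, n in runs:
--         if middle_i < pos + n:
--             return 0 if ch == '.' else n
--         pos += n
-- ===== Notes on version B (the rewrite author's own statement) =====
-- stated objective: alternative
-- what changed: B replaces A's expand-left/expand-right walks from the middle plus slice-and-replace with a single forward pass building the run-length (groupby) decomposition and a scan locating the run containing the middle index.
import Mathlib
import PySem

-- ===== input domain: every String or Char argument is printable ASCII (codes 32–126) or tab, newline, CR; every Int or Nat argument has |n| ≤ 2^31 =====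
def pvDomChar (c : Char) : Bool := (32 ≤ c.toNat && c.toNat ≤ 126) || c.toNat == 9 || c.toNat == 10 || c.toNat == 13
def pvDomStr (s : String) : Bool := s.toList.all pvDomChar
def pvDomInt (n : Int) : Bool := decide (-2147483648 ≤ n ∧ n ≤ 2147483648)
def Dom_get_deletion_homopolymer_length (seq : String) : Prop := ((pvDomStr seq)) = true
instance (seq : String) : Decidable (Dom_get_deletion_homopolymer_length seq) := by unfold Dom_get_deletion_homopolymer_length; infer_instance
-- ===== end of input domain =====

-- B builds the run-length (groupby) decomposition in one forward pass and scans runs to find the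
-- run containing the middle index, instead of A's expand-left/expand-right walks + slice/replace;
-- same O(n) cost, different algorithm.


-- ===== PORT A =====
-- 'while start > 0: if seq[start-1] == base: start -= 1 else: break'
def pvAStart (l : List Char) (b : Char) : Nat → Nat
  | 0 => 0
  | s + 1 => if l[s]? = some b then pvAStart l b s else s + 1

-- 'while end < seq_len: if seq[end] == base: end += 1 else: break'
def pvAEnd (l : List Char) (b : Char) (e : Nat) : Nat :=
  if _h : e < l.length then
    (if l[e]? = some b then pvAEnd l b (e + 1) else e)
  else e
termination_by l.length - e

def get_deletion_homopolymer_length (seq : String) : Int :=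
  let l := seq.toList
  let seq_len := l.length
  let middle_i := seq_len / 2            -- seq_len // 2, nonnegative
  match PySem.List.pyGet? l (middle_i : Int) with
  | none => 0                             -- Python: IndexError on empty seq; excluded by Pre_
  | some base =>
    let start := pvAStart l base middle_i
    let e := pvAEnd l base (middle_i + 1)
    let homopolymer :=
      PySem.Chars.replace (PySem.List.slice l (some (start : Int)) (some (e : Int))) ['.'] []
    (homopolymer.length : Int)

-- ===== PORT B =====
-- one step of the run-building loop; runs kept newest-first (Python appends / bumps runs[-1])
def pvAddRun (racc : List (Char × Int)) (ch : Char) : List (Char × Int) :=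
  match racc with
  | (c, k) :: rest => if c = ch then (c, k + 1) :: rest else (ch, 1) :: (c, k) :: rest
  | [] => [(ch, 1)]

-- 'for ch, n in runs: if middle_i < pos + n: return …; pos += n'
def pvFindRun (middle_i : Int) (pos : Int) : List (Char × Int) → Int
  | [] => 0   -- loop falls through only on empty seq (Python returns None); excluded by Pre_
  | (ch, n) :: rest =>
    if middle_i < pos + n then (if ch = '.' then 0 else n) else pvFindRun middle_i (pos + n) rest

def get_deletion_homopolymer_length_alt (seq : String) : Int :=
  let l := seq.toList
  let middle_i : Int := (l.length / 2 : Nat)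
  let runs := (l.foldl pvAddRun []).reverse
  pvFindRun middle_i 0 runs

-- ===== PRECONDITION & SPEC =====
-- Pre_ excludes only the empty string, on which A raises IndexError (seq[middle_i] on an empty seq).
def Pre_get_deletion_homopolymer_length (seq : String) : Prop := seq.toList ≠ []
instance (seq : String) : Decidable (Pre_get_deletion_homopolymer_length seq) := by
  unfold Pre_get_deletion_homopolymer_length; infer_instance

def pvWitness_get_deletion_homopolymer_length : String := "aab.b"

def Spec_get_deletion_homopolymer_length (seq : String) (out : Int) : Prop := out = get_deletion_homopolymer_length_alt seq
instance (seq : String) (out : Int) : Decidable (Spec_get_deletion_homopolymer_length seq out) := by unfold Spec_get_deletion_homopolymer_length; infer_instance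

-- ===== CLAIM (what is proved, stated in full; the proofs are below) =====
def Claim_equal_get_deletion_homopolymer_length : Prop := ∀ (seq : String), Dom_get_deletion_homopolymer_length seq → Pre_get_deletion_homopolymer_length seq → Spec_get_deletion_homopolymer_length seq (get_deletion_homopolymer_length seq)

-- ===== LEMMAS AND PROOFS =====

-- flatten a run list back into the character list it describes
def pvFlatR : List (Char × Int) → List Char
  | [] => []
  | (c, k) :: r => List.replicate k.toNat c ++ pvFlatR r

lemma pvFlatR_append (xs ys : List (Char × Int)) :
    pvFlatR (xs ++ ys) = pvFlatR xs ++ pvFlatR ys := by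
  induction xs with
  | nil => simp [pvFlatR]
  | cons p r ih => cases p; simp [pvFlatR, ih]

-- invariant of B's run-building fold (racc = reversed runs of the processed prefix)
lemma pvFoldl_inv (l : List Char) (racc : List (Char × Int))
    (hpos : ∀ p ∈ racc, 1 ≤ p.2)
    (hch : racc.IsChain (fun a b => a.1 ≠ b.1)) :
    (∀ p ∈ l.foldl pvAddRun racc, 1 ≤ p.2) ∧
    (l.foldl pvAddRun racc).IsChain (fun a b => a.1 ≠ b.1) ∧
    pvFlatR ((l.foldl pvAddRun racc).reverse) = pvFlatR racc.reverse ++ l := by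
  induction l generalizing racc with
  | nil => exact ⟨hpos, hch, by simp⟩
  | cons c t ih =>
    simp only [List.foldl_cons]
    rcases racc with _ | ⟨⟨c0, k⟩, rest⟩
    · simp only [pvAddRun]
      have h := ih [(c, 1)] (by simp) (List.isChain_singleton _)
      refine ⟨h.1, h.2.1, ?_⟩
      rw [h.2.2]; simp [pvFlatR]
    · by_cases hc : c0 = c
      · have hk : 1 ≤ k := hpos (c0, k) (List.mem_cons_self)
        simp only [pvAddRun, if_pos hc]
        have h := ih ((c0, k + 1) :: rest)
          (by intro p hp
              rcases List.mem_cons.mp hp with hp | hp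
              · subst hp; simp; omega
              · exact hpos p (List.mem_cons_of_mem _ hp))
          (by rcases rest with _ | ⟨q, r⟩
              · exact List.isChain_singleton _
              · rw [List.isChain_cons_cons] at hch ⊢; exact hch)
        refine ⟨h.1, h.2.1, ?_⟩
        rw [h.2.2]
        simp only [List.reverse_cons, pvFlatR_append, pvFlatR]
        have hrep : List.replicate (k + 1).toNat c0 = List.replicate k.toNat c0 ++ [c0] := by
          have h1 : (k + 1).toNat = k.toNat + 1 := by omega
          rw [h1, List.replicate_succ']
        rw [hrep]; simp [hc]
      · simp only [pvAddRun, if_neg hc]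
        have h := ih ((c, 1) :: (c0, k) :: rest)
          (by intro p hp
              rcases List.mem_cons.mp hp with hp | hp
              · subst hp; simp
              · exact hpos p hp)
          (by rw [List.isChain_cons_cons]; exact ⟨fun he => hc he.symm, hch⟩)
        refine ⟨h.1, h.2.1, ?_⟩
        rw [h.2.2]
        simp [pvFlatR_append, pvFlatR]

-- A's left walk: the unique s with s ≤ m, all chars in [s, m) equal to b, and a stopper just left of s
lemma pvAStart_eq (l : List Char) (b : Char) (m S : Nat)
    (h1 : S ≤ m) (h2 : ∀ i, S ≤ i → i < m → l[i]? = some b)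
    (h3 : S = 0 ∨ l[S - 1]? ≠ some b) : pvAStart l b m = S := by
  induction m with
  | zero =>
    have hS0 : S = 0 := by omega
    subst hS0; rfl
  | succ m ih =>
    rw [pvAStart]
    by_cases hS : S = m + 1
    · subst hS
      rcases h3 with h | h
      · omega
      · simp only [Nat.add_sub_cancel] at h
        rw [if_neg h]
    · have hSm : S ≤ m := by omega
      rw [if_pos (h2 m hSm (by omega))]
      exact ih hSm (fun i hi him => h2 i hi (Nat.lt_succ_of_lt him))

-- A's right walk: the unique E with e ≤ E ≤ len, all chars in [e, E) equal to b, and a stopper at E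
lemma pvAEnd_eq (l : List Char) (b : Char) (e E : Nat)
    (h1 : e ≤ E) (hE : E ≤ l.length)
    (h2 : ∀ i, e ≤ i → i < E → l[i]? = some b)
    (h3 : E = l.length ∨ l[E]? ≠ some b) : pvAEnd l b e = E := by
  rw [pvAEnd]
  by_cases hl : e < l.length
  · rw [dif_pos hl]
    by_cases heE : e = E
    · subst heE
      rcases h3 with h | h
      · omega
      · rw [if_neg h]
    · rw [if_pos (h2 e le_rfl (by omega))]
      exact pvAEnd_eq l b (e + 1) E (by omega) hE (fun i hi him => h2 i (by omega) him) h3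
  · rw [dif_neg hl]; omega
termination_by l.length - e

-- first character of a flattened nonempty run list
lemma pvFlatR_head (c2 : Char) (k2 : Int) (r : List (Char × Int)) (hk : 1 ≤ k2) :
    (pvFlatR ((c2, k2) :: r))[0]? = some c2 := by
  show (List.replicate k2.toNat c2 ++ pvFlatR r)[0]? = some c2
  rw [List.getElem?_append_left (by simp; omega)]
  rw [List.getElem?_replicate]
  simp; omega

-- B's scan is translation invariant in the accumulated position
lemma pvFindRun_shift (R : List (Char × Int)) (j pos : Int) :
    pvFindRun (pos + j) pos R = pvFindRun j 0 R := by
  induction R generalizing j pos with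
  | nil => rfl
  | cons p r ih =>
    obtain ⟨ch, n⟩ := p
    simp only [pvFindRun]
    by_cases h : j < n
    · rw [if_pos (show pos + j < pos + n by omega), if_pos (show j < 0 + n by omega)]
    · rw [if_neg (show ¬ pos + j < pos + n by omega), if_neg (show ¬ j < 0 + n by omega)]
      have h1 := ih (j - n) (pos + n)
      have h2 := ih (j - n) n
      have e1 : pos + n + (j - n) = pos + j := by ring
      have e2 : n + (j - n) = 0 + j := by ring
      rw [e1] at h1; rw [e2] at h2
      rw [h1, ← h2]
      norm_num

-- replace('.', '') on a dot-free run is the identity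
lemma pvReplace_go_no_dot (l : List Char) (hl : ∀ x ∈ l, x ≠ '.') :
    ∀ (fuel : Nat) (acc : List Char),
      PySem.Chars.replace.go ['.'] [] fuel l acc = acc.reverse ++ l := by
  induction l with
  | nil => intro fuel acc; cases fuel <;> simp [PySem.Chars.replace.go]
  | cons c t ih =>
    intro fuel acc
    cases fuel with
    | zero => simp [PySem.Chars.replace.go]
    | succ f =>
      rw [PySem.Chars.replace.go]
      have hc : c ≠ '.' := hl c (by simp)
      have hpre : (['.'] : List Char).isPrefixOf (c :: t) = false := by
        simp [List.isPrefixOf]; exact fun h => hc h.symm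
      rw [hpre]
      simp only [Bool.false_eq_true, if_false]
      rw [ih (fun x hx => hl x (by simp [hx])) f (c :: acc)]
      simp

-- replace('.', '') on an all-dot run deletes everything
lemma pvReplace_go_all_dot (k : Nat) :
    ∀ (fuel : Nat) (acc : List Char), k ≤ fuel →
      PySem.Chars.replace.go ['.'] [] fuel (List.replicate k '.') acc = acc.reverse := by
  induction k with
  | zero =>
    intro fuel acc _
    cases fuel <;> simp [PySem.Chars.replace.go]
  | succ k ih =>
    intro fuel acc hf
    obtain ⟨f, rfl⟩ : ∃ f, fuel = f + 1 := ⟨fuel - 1, by omega⟩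
    rw [List.replicate_succ, PySem.Chars.replace.go]
    have hpre : (['.'] : List Char).isPrefixOf ('.' :: List.replicate k '.') = true := by
      simp [List.isPrefixOf]
    rw [hpre]
    simp only [if_true]
    have : List.drop (['.'] : List Char).length ('.' :: List.replicate k '.') = List.replicate k '.' := by simp
    rw [this]
    exact ih f _ (by omega)

lemma pvReplace_replicate (k : Nat) (c : Char) :
    PySem.Chars.replace (List.replicate k c) ['.'] [] =
      if c = '.' then [] else List.replicate k c := by
  rw [PySem.Chars.replace]
  simp only [List.isEmpty_cons, Bool.false_eq_true, if_false]
  by_cases hc : c = '.'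
  · subst hc
    rw [if_pos rfl, pvReplace_go_all_dot k _ [] (by simp)]
    rfl
  · rw [if_neg hc,
      pvReplace_go_no_dot _ (by intro x hx; rw [List.eq_of_mem_replicate hx]; exact hc) _ []]
    rfl

-- the heart of the equivalence: on a list P ++ pvFlatR R with m inside pvFlatR R,
-- A's walk-and-replace around index P.length + m equals B's scan over R
lemma pvMain (R : List (Char × Int)) (P : List Char) (m : Nat)
    (hpos : ∀ p ∈ R, 1 ≤ p.2)
    (hch : R.IsChain (fun a b => a.1 ≠ b.1))
    (hb : ∀ cl, P.getLast? = some cl → ∀ c2 k2 rest2, R = (c2, k2) :: rest2 → cl ≠ c2)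
    (hm : m < (pvFlatR R).length)
    (b : Char) (hbm : (pvFlatR R)[m]? = some b) :
    ((PySem.Chars.replace
        (PySem.List.slice (P ++ pvFlatR R)
          (some ((pvAStart (P ++ pvFlatR R) b (P.length + m) : Nat) : Int))
          (some ((pvAEnd (P ++ pvFlatR R) b (P.length + m + 1) : Nat) : Int)))
        ['.'] []).length : Int) = pvFindRun (m : Int) 0 R := by
  induction R generalizing P m with
  | nil => simp [pvFlatR] at hm
  | cons p rest ih =>
    obtain ⟨c, k⟩ := p
    have hk : 1 ≤ k := hpos (c, k) List.mem_cons_self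
    set K := k.toNat with hK
    have hK1 : 1 ≤ K := by omega
    set l := P ++ pvFlatR ((c, k) :: rest) with hl
    have hflat : pvFlatR ((c, k) :: rest) = List.replicate K c ++ pvFlatR rest := rfl
    by_cases hmK : m < K
    · -- m lies in the first run: run is [P.length, P.length + K)
      have hbc : b = c := by
        rw [hflat] at hbm
        rw [List.getElem?_append_left (by simp only [List.length_replicate]; omega)] at hbm
        simp [hmK] at hbm
        exact hbm.symm
      subst hbc
      have hchar : ∀ i, P.length ≤ i → i < P.length + K → l[i]? = some b := by
        intro i hi1 hi2
        rw [hl, List.getElem?_append_right (by omega), hflat,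
          List.getElem?_append_left (by simp only [List.length_replicate]; omega)]
        simp [List.getElem?_replicate]
        omega
      have hstart : pvAStart l b (P.length + m) = P.length := by
        apply pvAStart_eq _ _ _ _ (by omega) (fun i hi him => hchar i hi (by omega))
        by_cases hP : P = []
        · left; simp [hP]
        · right
          have hlen1 : 1 ≤ P.length := List.length_pos_iff.mpr hP
          intro hcon
          rw [hl, List.getElem?_append_left (by omega)] at hcon
          exact hb b (by rw [List.getLast?_eq_getElem?]; exact hcon) b k rest rfl rfl
      have hlen : P.length + K ≤ l.length := by
        rw [hl, hflat]; simp [List.length_append, List.length_replicate]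
      have hend : pvAEnd l b (P.length + m + 1) = P.length + K := by
        apply pvAEnd_eq _ _ _ _ (by omega) hlen
          (fun i hi him => hchar i (by omega) him)
        rcases rest with _ | ⟨⟨c2, k2⟩, r2⟩
        · left; rw [hl, hflat]; simp [pvFlatR]
        · right
          have hk2 : 1 ≤ k2 := hpos (c2, k2) (List.mem_cons_of_mem _ List.mem_cons_self)
          rw [hl, List.getElem?_append_right (by omega), hflat,
            List.getElem?_append_right (by simp only [List.length_replicate]; omega)]
          simp only [List.length_replicate]
          have : P.length + K - P.length - K = 0 := by omega
          rw [this, pvFlatR_head c2 k2 r2 hk2]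
          have := hch.rel_head
          simp only [ne_eq] at this
          intro hcon
          exact this (by injection hcon with h; rw [h])
      rw [hstart, hend, PySem.List.slice_natCast]
      have hdrop : (l.drop P.length) = pvFlatR ((b, k) :: rest) := by
        rw [hl, List.drop_left]
      have htake : (pvFlatR ((b, k) :: rest)).take (P.length + K - P.length) =
          List.replicate K b := by
        have h1 : P.length + K - P.length = K := by omega
        rw [h1, hflat]
        rw [List.take_left' (by simp)]
      rw [hdrop, htake, pvReplace_replicate]
      have hmlt : (m : Int) < 0 + k := by omega
      rw [pvFindRun, if_pos hmlt]
      by_cases hc : b = '.'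
      · simp [hc]
      · simp only [hc, if_false, List.length_replicate]
        omega
    · -- m lies beyond the first run: shift into rest
      have hrest_pos : ∀ p ∈ rest, 1 ≤ p.2 := fun p hp => hpos p (List.mem_cons_of_mem _ hp)
      have hrest_ch : rest.IsChain (fun a b => a.1 ≠ b.1) := hch.tail
      have hm' : m - K < (pvFlatR rest).length := by
        rw [hflat] at hm; simp [List.length_append, List.length_replicate] at hm; omega
      have hbm' : (pvFlatR rest)[m - K]? = some b := by
        rw [hflat, List.getElem?_append_right (by simp only [List.length_replicate]; omega)] at hbm
        simpa [List.length_replicate] using hbm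
      have hb' : ∀ cl, (P ++ List.replicate K c).getLast? = some cl →
          ∀ c2 k2 rest2, rest = (c2, k2) :: rest2 → cl ≠ c2 := by
        intro cl hcl c2 k2 rest2 hr
        have hlast : (P ++ List.replicate K c).getLast? = some c := by
          rw [List.getLast?_append_of_ne_nil P (show List.replicate K c ≠ [] by
            simp only [ne_eq, List.replicate_eq_nil_iff]; omega)]
          rw [List.getLast?_replicate]; simp; omega
        rw [hcl] at hlast
        injection hlast with h
        subst h
        subst hr
        have := hch.rel_head
        simpa using this
      have heq := ih hrest_pos hrest_ch (P := P ++ List.replicate K c) (m := m - K) hb' hm' hbm'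
      have hlen' : (P ++ List.replicate K c).length = P.length + K := by
        simp [List.length_replicate]
      rw [hlen'] at heq
      have hidx : P.length + K + (m - K) = P.length + m := by omega
      rw [hidx] at heq
      have happ : (P ++ List.replicate K c) ++ pvFlatR rest = l := by
        rw [hl, hflat, List.append_assoc]
      rw [happ] at heq
      rw [heq]
      rw [pvFindRun, if_neg (by omega)]
      have hsh := pvFindRun_shift rest ((m : Int) - k) k
      have e1 : (k : Int) + ((m : Int) - k) = (m : Int) := by ring
      rw [e1] at hsh
      have e2 : ((m - K : Nat) : Int) = (m : Int) - k := by omega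
      rw [e2, ← hsh]
      norm_num

-- ===== VERDICT (by name: the statement is the Claim_ definition above) =====
theorem get_deletion_homopolymer_length_spec : Claim_equal_get_deletion_homopolymer_length := by
  intro seq _hdom hpre
  unfold Spec_get_deletion_homopolymer_length
  unfold Pre_get_deletion_homopolymer_length at hpre
  have hlen : 0 < seq.toList.length := List.length_pos_iff.mpr hpre
  have hm : seq.toList.length / 2 < seq.toList.length := by omega
  have hinv := pvFoldl_inv seq.toList [] (by simp) (by simp)
  have hflat : pvFlatR ((seq.toList.foldl pvAddRun []).reverse) = seq.toList := by
    simpa [pvFlatR] using hinv.2.2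
  have hpos : ∀ p ∈ (seq.toList.foldl pvAddRun []).reverse, 1 ≤ p.2 :=
    fun p hp => hinv.1 p (List.mem_reverse.mp hp)
  have hch : ((seq.toList.foldl pvAddRun []).reverse).IsChain (fun a b => a.1 ≠ b.1) := by
    rw [List.isChain_reverse]
    exact List.IsChain.imp (fun {a b} h he => h he.symm) hinv.2.1
  have hbm : seq.toList[seq.toList.length / 2]? = some (seq.toList[seq.toList.length / 2]'hm) :=
    List.getElem?_eq_getElem hm
  have hget : PySem.List.pyGet? seq.toList ((seq.toList.length / 2 : Nat) : Int) =
      some (seq.toList[seq.toList.length / 2]'hm) := by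
    rw [PySem.List.pyGet?_natCast]; exact hbm
  have hmain := pvMain ((seq.toList.foldl pvAddRun []).reverse) [] (seq.toList.length / 2)
    hpos hch (by intro cl hcl; simp at hcl) (by rw [hflat]; exact hm)
    (seq.toList[seq.toList.length / 2]'hm) (by rw [hflat]; exact hbm)
  rw [hflat] at hmain
  simp only [List.nil_append, List.length_nil, Nat.zero_add] at hmain
  simp only [get_deletion_homopolymer_length, get_deletion_homopolymer_length_alt]
  simp only [hget]
  exact hmain
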